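-- pv_equiv track=rewrite | github.com/sumithkumar07/AETHERFLOW | backend/services/workspace_intelligence.py | _group_activities_by_session
-- ===== SOURCE A (Python) =====
-- from typing import Dict, List, Optional, Any
--
-- def _group_activities_by_session(activities: List[Dict[str, Any]]) -> List[List[Dict[str, Any]]]:
--     """Group activities into sessions based on time gaps"""
--     sessions = []
--     current_session = []
--     session_gap_threshold = 300  # 5 minutes in seconds
--
--     for i, activity in enumerate(activities):
--         if i == 0:
--             current_session.append(activity)
--             continue
--
--         # Check time gap from previous activity
--         time_gap = activity.get("time_gap", 0)
--         if time_gap > session_gap_threshold: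
--             if current_session:
--                 sessions.append(current_session)
--             current_session = [activity]
--         else:
--             current_session.append(activity)
--
--     if current_session:
--         sessions.append(current_session)
--
--     return sessions
-- ===== SOURCE B (Python) =====
-- def _group_activities_by_session(activities):
--     """Recursive span-based grouping: peel off the first session, recurse on the rest."""
--     if not activities:
--         return []
--     rest = activities[1:]
--     j = 0
--     while j < len(rest) and rest[j].get("time_gap", 0) <= 300:
--         j += 1
--     return [[activities[0]] + rest[:j]] + _group_activities_by_session(rest[j:])
-- ===== Notes on version B (the rewrite author's own statement) =====
-- stated objective: alternative
-- what changed: A builds sessions with one flat loop mutating a current-session accumulator and a final flush; B recursively peels off one session at a time by scanning the tail for the first gap > 300 and recursing on the remainder.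
import Mathlib
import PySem

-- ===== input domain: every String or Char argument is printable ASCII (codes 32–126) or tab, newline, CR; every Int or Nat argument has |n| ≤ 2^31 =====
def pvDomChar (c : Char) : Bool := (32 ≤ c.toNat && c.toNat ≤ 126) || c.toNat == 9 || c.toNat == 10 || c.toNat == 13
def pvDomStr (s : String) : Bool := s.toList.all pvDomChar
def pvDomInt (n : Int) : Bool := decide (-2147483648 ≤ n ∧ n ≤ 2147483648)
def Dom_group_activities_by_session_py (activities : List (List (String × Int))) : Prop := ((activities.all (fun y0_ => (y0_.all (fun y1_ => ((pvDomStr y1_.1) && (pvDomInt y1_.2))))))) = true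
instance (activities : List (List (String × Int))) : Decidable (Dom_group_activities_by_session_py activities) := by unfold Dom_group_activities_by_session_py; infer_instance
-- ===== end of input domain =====

-- B replaces A's single accumulator loop by a recursive peel-off-one-session decomposition; same cost, alternative structure.

-- ===== PORT A =====
-- activity.get("time_gap", 0): first-match association-list lookup with default
def pvGap (d : List (String × Int)) : Int := (PySem.Dict.mk d).getD "time_gap" 0

-- loop body of A's for-loop (state = (sessions, current_session))
def pvStepA (st : List (List (List (String × Int))) × List (List (String × Int)))
    (p : Int × List (String × Int)) :
    List (List (List (String × Int))) × List (List (String × Int)) :=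
  if p.1 == 0 then (st.1, st.2 ++ [p.2])
  else
    let time_gap := pvGap p.2
    if time_gap > 300 then
      ((if st.2 ≠ [] then st.1 ++ [st.2] else st.1), [p.2])
    else (st.1, st.2 ++ [p.2])

def group_activities_by_session_py (activities : List (List (String × Int))) : List (List (List (String × Int))) :=
  let fin := (PySem.List.enumerate activities).foldl pvStepA ([], [])
  if fin.2 ≠ [] then fin.1 ++ [fin.2] else fin.1

-- ===== PORT B =====
-- B's while loop + slices: split the tail at the first activity with time_gap > 300
def pvSessionSpan : List (List (String × Int)) → List (List (String × Int)) × List (List (String × Int))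
  | [] => ([], [])
  | d :: ds =>
    if pvGap d ≤ 300 then
      let p := pvSessionSpan ds
      (d :: p.1, p.2)
    else ([], d :: ds)

theorem pvSessionSpan_snd_length (ds : List (List (String × Int))) :
    (pvSessionSpan ds).2.length ≤ ds.length := by
  induction ds with
  | nil => simp [pvSessionSpan]
  | cons d ds ih =>
    simp only [pvSessionSpan]
    split
    · exact Nat.le_succ_of_le ih
    · simp

def group_activities_by_session_py_alt : List (List (String × Int)) → List (List (List (String × Int)))
  | [] => []
  | a :: rest =>
    let p := pvSessionSpan rest
    (a :: p.1) :: group_activities_by_session_py_alt p.2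
termination_by xs => xs.length
decreasing_by
  have := pvSessionSpan_snd_length rest
  simpa using Nat.lt_succ_of_le this

-- ===== PRECONDITION & SPEC =====
def Spec_group_activities_by_session_py (activities : List (List (String × Int))) (out : List (List (List (String × Int)))) : Prop := out = group_activities_by_session_py_alt activities
instance (activities : List (List (String × Int))) (out : List (List (List (String × Int)))) : Decidable (Spec_group_activities_by_session_py activities out) := by unfold Spec_group_activities_by_session_py; infer_instance

-- ===== CLAIM (what is proved, stated in full; the proofs are below) =====
def Claim_equal_group_activities_by_session_py : Prop := ∀ (activities : List (List (String × Int))), Dom_group_activities_by_session_py activities → Spec_group_activities_by_session_py activities (group_activities_by_session_py activities)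

-- ===== LEMMAS AND PROOFS =====

-- A's loop body on indices ≥ 1 (the index no longer matters)
def pvStepTail (st : List (List (List (String × Int))) × List (List (String × Int)))
    (a : List (String × Int)) :
    List (List (List (String × Int))) × List (List (String × Int)) :=
  if pvGap a > 300 then
    ((if st.2 ≠ [] then st.1 ++ [st.2] else st.1), [a])
  else (st.1, st.2 ++ [a])

theorem pv_foldl_enum (rest : List (List (String × Int))) :
    ∀ (k : Int) (st : List (List (List (String × Int))) × List (List (String × Int))),
      1 ≤ k →
      (PySem.List.enumerate rest k).foldl pvStepA st = rest.foldl pvStepTail st := by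
  induction rest with
  | nil => intro k st hk; simp [PySem.List.enumerate_nil]
  | cons a rest ih =>
    intro k st hk
    rw [PySem.List.enumerate_cons]
    simp only [List.foldl_cons]
    have hk0 : (k == 0) = false := by simp; omega
    have hstep : pvStepA st (k, a) = pvStepTail st a := by
      simp [pvStepA, pvStepTail, hk0]
    rw [hstep, ih (k + 1) _ (by omega)]

theorem pv_main (rest : List (List (String × Int))) :
    ∀ (S : List (List (List (String × Int)))) (c : List (List (String × Int))),
      c ≠ [] →
      (let fin := rest.foldl pvStepTail (S, c)
       if fin.2 ≠ [] then fin.1 ++ [fin.2] else fin.1) =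
      S ++ (c ++ (pvSessionSpan rest).1) :: group_activities_by_session_py_alt (pvSessionSpan rest).2 := by
  induction rest with
  | nil =>
    intro S c hc
    simp [pvSessionSpan, group_activities_by_session_py_alt, hc]
  | cons a rest ih =>
    intro S c hc
    by_cases hgap : pvGap a > 300
    · have hstep : pvStepTail (S, c) a = (S ++ [c], [a]) := by
        simp [pvStepTail, hgap, hc]
      simp only [List.foldl_cons, hstep]
      rw [ih (S ++ [c]) [a] (by simp)]
      have hspan : pvSessionSpan (a :: rest) = ([], a :: rest) := by
        simp [pvSessionSpan]; omega
      rw [hspan]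
      simp [group_activities_by_session_py_alt]
    · have hstep : pvStepTail (S, c) a = (S, c ++ [a]) := by
        simp [pvStepTail, hgap]
      simp only [List.foldl_cons, hstep]
      rw [ih S (c ++ [a]) (by simp)]
      have hspan : pvSessionSpan (a :: rest) = (a :: (pvSessionSpan rest).1, (pvSessionSpan rest).2) := by
        simp only [pvSessionSpan]
        rw [if_pos (by omega)]
      rw [hspan]
      simp

-- ===== VERDICT (by name: the statement is the Claim_ definition above) =====
theorem group_activities_by_session_py_spec : Claim_equal_group_activities_by_session_py := by
  intro activities _
  unfold Spec_group_activities_by_session_py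
  cases activities with
  | nil => simp [group_activities_by_session_py, group_activities_by_session_py_alt, PySem.List.enumerate_nil]
  | cons a rest =>
    unfold group_activities_by_session_py
    rw [PySem.List.enumerate_cons]
    simp only [List.foldl_cons]
    have h0 : pvStepA ([], []) (0, a) = ([], [a]) := by simp [pvStepA]
    rw [h0, pv_foldl_enum rest (0 + 1) ([], [a]) (by omega)]
    have := pv_main rest [] [a] (by simp)
    simp only [List.nil_append] at this
    rw [this]
    conv_rhs => rw [group_activities_by_session_py_alt]
    simp
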